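-- pv_equiv track=rewrite | github.com/cyclecycle/role-pattern-nlp | role_pattern_builder.py | build_pattern_label_list
-- ===== SOURCE A (Python) =====
-- def build_pattern_label_list(match_tokens, match_example):
--     match_token_labels = []
--     for w in match_tokens:
--         label = None
--         for label_, tokens in match_example.items():
--             if w in tokens:
--                 label = label_
--         match_token_labels.append(label)
--     return match_token_labels
-- ===== SOURCE B (Python) =====
-- def build_pattern_label_list(match_tokens, match_example):
--     token_label = {}
--     for label, tokens in match_example.items():
--         for t in tokens:
--             token_label[t] = label
--     return [token_label.get(t) for t in match_tokens]
-- ===== Notes on version B (the rewrite author's own statement) =====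
-- stated objective: faster
-- what changed: Instead of scanning every example token list for every match token, B builds a token-to-label dict in one pass (later labels overwrite, matching A's last-match rule) and answers each token by an O(1) lookup.
import Mathlib
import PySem

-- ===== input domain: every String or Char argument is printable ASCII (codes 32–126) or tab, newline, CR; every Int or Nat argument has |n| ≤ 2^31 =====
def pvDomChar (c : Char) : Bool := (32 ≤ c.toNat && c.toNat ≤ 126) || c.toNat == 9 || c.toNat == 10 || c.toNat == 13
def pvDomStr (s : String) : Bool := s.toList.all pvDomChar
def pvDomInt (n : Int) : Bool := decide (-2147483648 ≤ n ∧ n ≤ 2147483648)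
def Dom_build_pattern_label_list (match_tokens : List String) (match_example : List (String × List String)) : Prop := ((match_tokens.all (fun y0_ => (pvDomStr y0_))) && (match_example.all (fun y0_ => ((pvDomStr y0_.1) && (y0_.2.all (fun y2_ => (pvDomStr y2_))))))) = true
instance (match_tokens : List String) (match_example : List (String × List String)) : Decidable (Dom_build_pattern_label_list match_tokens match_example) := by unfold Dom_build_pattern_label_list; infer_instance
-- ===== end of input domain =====

-- B replaces A's per-token scan of every example list by a token→label dict built once
-- (later labels overwrite, matching A's last-match rule) followed by O(1) lookups.

-- ===== PORT A =====
-- for w in match_tokens: label = None; for label_, tokens in items: if w in tokens: label = label_; append label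
def build_pattern_label_list (match_tokens : List String) (match_example : List (String × List String)) : List (Option String) :=
  match_tokens.foldl
    (fun acc w =>
      acc ++ [match_example.foldl
        (fun label p => if w ∈ p.2 then some p.1 else label) none])
    []

-- ===== PORT B =====
-- token_label = {}; for label, tokens in items: for t in tokens: token_label[t] = label;
-- return [token_label.get(t) for t in match_tokens]
def build_pattern_label_list_alt (match_tokens : List String) (match_example : List (String × List String)) : List (Option String) :=
  let token_label : PySem.Dict String String :=
    match_example.foldl
      (fun d p => p.2.foldl (fun d t => d.insert t p.1) d)
      PySem.Dict.empty
  match_tokens.map (fun t => token_label.get? t)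

-- ===== PRECONDITION & SPEC =====
def Spec_build_pattern_label_list (match_tokens : List String) (match_example : List (String × List String)) (out : List (Option String)) : Prop := out = build_pattern_label_list_alt match_tokens match_example
instance (match_tokens : List String) (match_example : List (String × List String)) (out : List (Option String)) : Decidable (Spec_build_pattern_label_list match_tokens match_example out) := by unfold Spec_build_pattern_label_list; infer_instance

-- ===== CLAIM (what is proved, stated in full; the proofs are below) =====
def Claim_equal_build_pattern_label_list : Prop := ∀ (match_tokens : List String) (match_example : List (String × List String)), Dom_build_pattern_label_list match_tokens match_example → Spec_build_pattern_label_list match_tokens match_example (build_pattern_label_list match_tokens match_example)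

-- ===== LEMMAS AND PROOFS =====

-- inserting the same value l at every key of toks: lookup is l on members, unchanged elsewhere
theorem get?_foldl_insert_const (toks : List String) (l w : String) (d : PySem.Dict String String) :
    (toks.foldl (fun d t => d.insert t l) d).get? w
      = if w ∈ toks then some l else d.get? w := by
  induction toks generalizing d with
  | nil => simp
  | cons t ts ih =>
      simp only [List.foldl_cons, ih, List.mem_cons]
      by_cases hw : w ∈ ts
      · simp [hw]
      · by_cases he : w = t
        · simp [he, PySem.Dict.get?_insert_self]
        · simp [hw, he, PySem.Dict.get?_insert_of_ne _ _ he]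

-- the dict built over the pairs answers w with A's last-match fold, from any starting dict
theorem get?_build_dict (pairs : List (String × List String)) (w : String) (d : PySem.Dict String String) :
    (pairs.foldl (fun d p => p.2.foldl (fun d t => d.insert t p.1) d) d).get? w
      = pairs.foldl (fun label p => if w ∈ p.2 then some p.1 else label) (d.get? w) := by
  induction pairs generalizing d with
  | nil => rfl
  | cons p ps ih =>
      simp only [List.foldl_cons, ih, get?_foldl_insert_const]

-- A's append-accumulator loop builds acc ++ map f
theorem foldl_append_singleton (xs : List String) (f : String → Option String) (acc : List (Option String)) :
    xs.foldl (fun acc w => acc ++ [f w]) acc = acc ++ xs.map f := by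
  induction xs generalizing acc with
  | nil => simp
  | cons x xs ih => simp [ih]

-- ===== VERDICT (by name: the statement is the Claim_ definition above) =====
theorem build_pattern_label_list_spec : Claim_equal_build_pattern_label_list := by
  intro match_tokens match_example _
  unfold Spec_build_pattern_label_list build_pattern_label_list build_pattern_label_list_alt
  simp only [foldl_append_singleton, List.nil_append]
  apply List.map_congr_left
  intro w _
  rw [get?_build_dict]
  rfl
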